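-- pv_equiv track=rewrite | github.com/KORVEX-HSE/my_first_repository | testDZ.py | message_fib
-- ===== SOURCE A (Python) =====
-- def message_fib(s:str):
--     if s == "" :
--       return 0
--     result = 1
--     count = 1
--     fib_1 = 1
--     fib_2 = 1
--     for i in range(len(s) - 1):
--       if (int(s[i ] + s[i + 1]) > 9 and int(s[i] + s[i + 1]) < 34):
--         count += 1
--         fib_2 += fib_1
--         fib_1 = fib_2 - fib_1
--       else:
--         result = result * fib_2
--         fib_1 = fib_2 = 1
--         count = 1
--     result = result * fib_2
--     return result
-- ===== SOURCE B (Python) =====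
-- from itertools import groupby
--
--
-- def _fib(n):
--     # _fib(0) = _fib(1) = 1, _fib(2) = 2, ...
--     a, b = 1, 1
--     for _ in range(n):
--         a, b = b, a + b
--     return a
--
--
-- def message_fib(s: str):
--     if s == "":
--         return 0
--     # validity flag for each adjacent pair
--     flags = [10 <= int(s[i:i + 2]) <= 33 for i in range(len(s) - 1)]
--     result = 1
--     for flag, group in groupby(flags):
--         if flag:
--             run_length = len(list(group))
--             result *= _fib(run_length + 1)
--     return result
-- ===== Notes on version B (the rewrite author's own statement) =====
-- stated objective: alternative
-- what changed: B replaces A's single loop with interleaved Fibonacci/reset state by a separate pass: a list of pair-validity flags, itertools.groupby to extract runs of valid pairs, and a named Fibonacci helper, multiplying fib(L+1) per run of length L.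
import Mathlib
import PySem

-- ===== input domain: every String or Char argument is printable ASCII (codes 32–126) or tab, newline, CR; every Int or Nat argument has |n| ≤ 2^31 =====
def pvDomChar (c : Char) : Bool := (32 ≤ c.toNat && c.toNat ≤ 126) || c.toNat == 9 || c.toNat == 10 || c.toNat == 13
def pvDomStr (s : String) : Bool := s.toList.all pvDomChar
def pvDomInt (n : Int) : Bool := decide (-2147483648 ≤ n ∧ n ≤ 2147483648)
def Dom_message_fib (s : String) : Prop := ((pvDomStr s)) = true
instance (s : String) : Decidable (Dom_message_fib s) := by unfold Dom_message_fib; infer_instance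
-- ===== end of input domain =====

-- B replaces A's in-loop Fibonacci/reset bookkeeping by a separate pass: pair-validity flags,
-- grouped into runs, each run multiplying in a named Fibonacci value (alternative decomposition).


-- ===== PORT A =====
def message_fib (s : String) : Int :=
  if s = "" then 0
  else
    let cs := s.toList
    let st := (PySem.List.pyRange 0 ((cs.length : Int) - 1) 1).foldl
      (fun (st : Int × Int × Int × Int) i =>
        let result := st.1
        let count := st.2.1
        let fib1 := st.2.2.1
        let fib2 := st.2.2.2
        -- int(s[i] + s[i+1]); where it is none Python raises ValueError (excluded by Pre_)
        match (do
          let a ← PySem.List.pyGet? cs i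
          let b ← PySem.List.pyGet? cs (i + 1)
          PySem.Int.ofChars? [a, b] : Option Int) with
        | some v =>
          if 9 < v ∧ v < 34 then (result, count + 1, fib2, fib1 + fib2)
          else (result * fib2, (1 : Int), (1 : Int), (1 : Int))
        | none => (result * fib2, (1 : Int), (1 : Int), (1 : Int)))
      (1, 1, 1, 1)
    st.1 * st.2.2.2

-- ===== PORT B =====
-- fib helper of Source B: _fib 0 = _fib 1 = 1, _fib 2 = 2, …
def pvFibB (n : Nat) : Int :=
  ((List.range n).foldl (fun (p : Int × Int) _ => (p.2, p.1 + p.2)) (1, 1)).1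

-- the flag list of Source B; s[i:i+2] = (cs.drop i).take 2 for 0 ≤ i; where int() would
-- raise ValueError (excluded by Pre_) the flag is false
def pvFlags (cs : List Char) : List Bool :=
  (List.range (cs.length - 1)).map (fun i =>
    match PySem.Int.ofChars? ((cs.drop i).take 2) with
    | some v => decide (10 ≤ v ∧ v ≤ 33)
    | none => false)

-- itertools.groupby over Bool flags, as (key, run-length) pairs
def pvRunsAux : List Bool → Bool → Nat → List (Bool × Nat)
  | [], cur, n => [(cur, n)]
  | b :: rest, cur, n =>
    if b = cur then pvRunsAux rest cur (n + 1) else (cur, n) :: pvRunsAux rest b 1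

def pvRuns : List Bool → List (Bool × Nat)
  | [] => []
  | b :: rest => pvRunsAux rest b 1

def message_fib_alt (s : String) : Int :=
  if s = "" then 0
  else
    (pvRuns (pvFlags s.toList)).foldl
      (fun (r : Int) (kg : Bool × Nat) => if kg.1 then r * pvFibB (kg.2 + 1) else r) 1

-- ===== PRECONDITION & SPEC =====
-- Pre_ excludes exactly the strings on which Python A raises ValueError: some adjacent
-- two-character pair does not parse as an int.
def Pre_message_fib (s : String) : Prop :=
  ∀ i ∈ List.range (s.toList.length - 1),
    (PySem.Int.ofChars? ((s.toList.drop i).take 2)).isSome = true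
instance (s : String) : Decidable (Pre_message_fib s) := by unfold Pre_message_fib; infer_instance

def pvWitness_message_fib : String := "1234"

def Spec_message_fib (s : String) (out : Int) : Prop := out = message_fib_alt s
instance (s : String) (out : Int) : Decidable (Spec_message_fib s out) := by unfold Spec_message_fib; infer_instance

-- ===== CLAIM (what is proved, stated in full; the proofs are below) =====
def Claim_equal_message_fib : Prop :=
  ∀ (s : String), Dom_message_fib s → Pre_message_fib s → Spec_message_fib s (message_fib s)

-- ===== LEMMAS AND PROOFS =====

-- A's loop step, abstracted over the pair-validity flag
def pvAStep (st : Int × Int × Int × Int) (b : Bool) : Int × Int × Int × Int :=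
  if b then (st.1, st.2.1 + 1, st.2.2.2, st.2.2.1 + st.2.2.2)
  else (st.1 * st.2.2.2, 1, 1, 1)

-- B's run-consuming step
def pvBStep (r : Int) (kg : Bool × Nat) : Int :=
  if kg.1 then r * pvFibB (kg.2 + 1) else r

-- Fibonacci pairs: pvFib2 n = (Fib n, Fib (n+1)) in Source B's indexing
def pvFib2 : Nat → Int × Int
  | 0 => (1, 1)
  | n + 1 => ((pvFib2 n).2, (pvFib2 n).1 + (pvFib2 n).2)

theorem pvFibB_eq (n : Nat) : pvFibB n = (pvFib2 n).1 := by
  suffices h : (List.range n).foldl (fun (p : Int × Int) _ => (p.2, p.1 + p.2)) (1, 1) = pvFib2 n by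
    simp [pvFibB, h]
  induction n with
  | zero => simp [pvFib2]
  | succ n ih => rw [List.range_succ, List.foldl_append, ih]; simp [pvFib2]

-- The value contributed by the rest of the flag stream while k valid pairs deep in a run
def pvVal : Nat → List Bool → Int
  | k, [] => (pvFib2 k).2
  | k, true :: r => pvVal (k + 1) r
  | k, false :: r => (pvFib2 k).2 * pvVal 0 r

theorem pvA_loop (flags : List Bool) : ∀ (r c : Int) (k : Nat),
    (let st := flags.foldl pvAStep (r, c, (pvFib2 k).1, (pvFib2 k).2); st.1 * st.2.2.2)
      = r * pvVal k flags := by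
  induction flags with
  | nil => intro r c k; simp [pvVal]
  | cons b rest ih =>
    intro r c k
    cases b with
    | true =>
      have : pvAStep (r, c, (pvFib2 k).1, (pvFib2 k).2) true
          = (r, c + 1, (pvFib2 (k + 1)).1, (pvFib2 (k + 1)).2) := by
        simp [pvAStep, pvFib2]
      simp only [List.foldl_cons, this]
      simpa [pvVal] using ih r (c + 1) (k + 1)
    | false =>
      have : pvAStep (r, c, (pvFib2 k).1, (pvFib2 k).2) false
          = (r * (pvFib2 k).2, 1, (pvFib2 0).1, (pvFib2 0).2) := by
        simp [pvAStep, pvFib2]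
      simp only [List.foldl_cons, this]
      have := ih (r * (pvFib2 k).2) 1 0
      simp only [this, pvVal]
      ring

theorem pvB_loop (flags : List Bool) : ∀ (r : Int) (cur : Bool) (n : Nat),
    (pvRunsAux flags cur n).foldl pvBStep r
      = r * (if cur then pvVal n flags else pvVal 0 flags) := by
  induction flags with
  | nil =>
    intro r cur n
    cases cur <;> simp [pvRunsAux, pvBStep, pvVal, pvFibB_eq, pvFib2]
  | cons b rest ih =>
    intro r cur n
    cases b <;> cases cur <;>
      simp only [pvRunsAux, if_true, if_false, Bool.true_eq_false, Bool.false_eq_true,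
        List.foldl_cons]
    · simpa [pvVal, pvFib2] using ih r false (n + 1)
    · have hb : pvBStep r (true, n) = r * (pvFib2 n).2 := by
        simp [pvBStep, pvFibB_eq, pvFib2]
      rw [hb, ih (r * (pvFib2 n).2) false 1]
      simp [pvVal]; ring
    · have hb : pvBStep r (false, n) = r := by simp [pvBStep]
      rw [hb, ih r true 1]
      simp [pvVal]
    · simpa [pvVal] using ih r true (n + 1)

-- both programs as a function of the flag stream
theorem pvFold_eq_runs (flags : List Bool) :
    (let st := flags.foldl pvAStep ((1 : Int), (1 : Int), (1 : Int), (1 : Int)); st.1 * st.2.2.2)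
      = (pvRuns flags).foldl pvBStep 1 := by
  cases flags with
  | nil => simp [pvRuns]
  | cons b rest =>
    have hA := pvA_loop (b :: rest) 1 1 0
    have h0 : (pvFib2 0).1 = 1 ∧ (pvFib2 0).2 = 1 := ⟨rfl, rfl⟩
    rw [show ((1 : Int), (1 : Int), (1 : Int), (1 : Int))
        = ((1 : Int), (1 : Int), (pvFib2 0).1, (pvFib2 0).2) by rfl]
    rw [hA]
    show (1 : Int) * pvVal 0 (b :: rest) = (pvRunsAux rest b 1).foldl pvBStep 1
    rw [pvB_loop rest 1 b 1]
    cases b <;> simp [pvVal, pvFib2]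

-- A's in-loop pair test at index ↑k equals B's k-th flag
theorem pvStep_eq (cs : List Char) (st : Int × Int × Int × Int) (k : Nat)
    (hk : k < cs.length - 1) :
    (let result := st.1
     let count := st.2.1
     let fib1 := st.2.2.1
     let fib2 := st.2.2.2
     match (do
        let a ← PySem.List.pyGet? cs (k : Int)
        let b ← PySem.List.pyGet? cs ((k : Int) + 1)
        PySem.Int.ofChars? [a, b] : Option Int) with
      | some v =>
        if 9 < v ∧ v < 34 then (result, count + 1, fib2, fib1 + fib2)
        else (result * fib2, (1 : Int), (1 : Int), (1 : Int))
      | none => (result * fib2, (1 : Int), (1 : Int), (1 : Int)))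
    = pvAStep st
        (match PySem.Int.ofChars? ((cs.drop k).take 2) with
         | some v => decide (10 ≤ v ∧ v ≤ 33)
         | none => false) := by
  have hk1 : k < cs.length := by omega
  have hk2 : k + 1 < cs.length := by omega
  have hpair : (cs.drop k).take 2 = [cs[k], cs[k + 1]] := by
    rw [List.drop_eq_getElem_cons hk1, List.take_succ_cons,
        List.drop_eq_getElem_cons hk2, List.take_succ_cons, List.take_zero]
  have hg1 : PySem.List.pyGet? cs (k : Int) = some cs[k] := by
    rw [PySem.List.pyGet?_natCast]; exact List.getElem?_eq_getElem hk1
  have hg2 : PySem.List.pyGet? cs ((k : Int) + 1) = some cs[k + 1] := by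
    rw [show ((k : Int) + 1) = ((k + 1 : Nat) : Int) by push_cast; ring,
        PySem.List.pyGet?_natCast]
    exact List.getElem?_eq_getElem hk2
  rw [hpair]
  simp only [hg1, hg2, Option.bind_eq_bind, Option.bind_some]
  cases h : PySem.Int.ofChars? [cs[k], cs[k + 1]] with
  | none => simp [pvAStep]
  | some v =>
    by_cases hv : 10 ≤ v ∧ v ≤ 33
    · have h34 : 9 < v ∧ v < 34 := by omega
      simp [pvAStep, h34, hv]
    · have h34 : ¬ (9 < v ∧ v < 34) := by omega
      simp [pvAStep, h34, hv]

-- ===== VERDICT (by name: the statement is the Claim_ definition above) =====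
theorem message_fib_spec : Claim_equal_message_fib := by
  intro s _hdom _hpre
  unfold Spec_message_fib message_fib message_fib_alt
  by_cases hs : s = ""
  · simp [hs]
  · simp only [hs, if_false]
    set cs := s.toList with hcs
    have hlen : 1 ≤ cs.length := by
      rcases Nat.eq_zero_or_pos cs.length with h0 | h1
      · exact absurd (by
          have : cs = [] := List.eq_nil_of_length_eq_zero h0
          have : s.toList = "".toList := by simpa [hcs] using this
          exact String.toList_inj.mp this) hs
      · exact h1
    have hr : ((cs.length : Int) - 1) = ((cs.length - 1 : Nat) : Int) := by
      push_cast [hlen]; ring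
    rw [hr, PySem.List.pyRange_zero_natCast]
    rw [List.foldl_map]
    have hcong : (List.range (cs.length - 1)).foldl
        (fun (st : Int × Int × Int × Int) (k : Nat) =>
          (fun (st : Int × Int × Int × Int) (i : Int) =>
            let result := st.1
            let count := st.2.1
            let fib1 := st.2.2.1
            let fib2 := st.2.2.2
            match (do
              let a ← PySem.List.pyGet? cs i
              let b ← PySem.List.pyGet? cs (i + 1)
              PySem.Int.ofChars? [a, b] : Option Int) with
            | some v =>
              if 9 < v ∧ v < 34 then (result, count + 1, fib2, fib1 + fib2)
              else (result * fib2, (1 : Int), (1 : Int), (1 : Int))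
            | none => (result * fib2, (1 : Int), (1 : Int), (1 : Int))) st (k : Int))
        (1, 1, 1, 1)
        = (List.range (cs.length - 1)).foldl
        (fun (st : Int × Int × Int × Int) (k : Nat) =>
          pvAStep st
            (match PySem.Int.ofChars? ((cs.drop k).take 2) with
             | some v => decide (10 ≤ v ∧ v ≤ 33)
             | none => false))
        (1, 1, 1, 1) := by
      apply PySem.List.foldl_congr_mem
      intro st k hkmem
      exact pvStep_eq cs st k (List.mem_range.mp hkmem)
    rw [hcong]
    rw [show (List.range (cs.length - 1)).foldl
        (fun (st : Int × Int × Int × Int) (k : Nat) =>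
          pvAStep st
            (match PySem.Int.ofChars? ((cs.drop k).take 2) with
             | some v => decide (10 ≤ v ∧ v ≤ 33)
             | none => false))
        (1, 1, 1, 1)
      = (pvFlags cs).foldl pvAStep (1, 1, 1, 1) by
        rw [pvFlags, List.foldl_map]]
    exact pvFold_eq_runs (pvFlags cs)
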